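-- pv_equiv track=rewrite | github.com/BiluAilu/A2SV-Practice | Contest/Camp/13/C.py | reSum
-- ===== SOURCE A (Python) =====
-- def reSum(n,c):
--     if len(str(n))==1:
--         return c
--     else:
--         n_s=str(n)
--         sum=0
--         for i in n_s:
--             sum+=int(i)
--         c+=1
--         return reSum(sum,c)
-- ===== SOURCE B (Python) =====
-- def reSum(n, c):
--     # Arithmetic digit-sum loop: no string conversion, no recursion.
--     while n > 9:
--         s = 0
--         m = n
--         while m > 0:
--             s += m % 10
--             m //= 10
--         n = s
--         c += 1
--     return c
-- ===== Notes on version B (the rewrite author's own statement) =====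
-- stated objective: alternative
-- what changed: B replaces A's recursive string-based digit summing (str(n), per-character int()) by an iterative outer while-loop with an inner arithmetic loop using % 10 and // 10, with no string conversion and no recursion.
import Mathlib
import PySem

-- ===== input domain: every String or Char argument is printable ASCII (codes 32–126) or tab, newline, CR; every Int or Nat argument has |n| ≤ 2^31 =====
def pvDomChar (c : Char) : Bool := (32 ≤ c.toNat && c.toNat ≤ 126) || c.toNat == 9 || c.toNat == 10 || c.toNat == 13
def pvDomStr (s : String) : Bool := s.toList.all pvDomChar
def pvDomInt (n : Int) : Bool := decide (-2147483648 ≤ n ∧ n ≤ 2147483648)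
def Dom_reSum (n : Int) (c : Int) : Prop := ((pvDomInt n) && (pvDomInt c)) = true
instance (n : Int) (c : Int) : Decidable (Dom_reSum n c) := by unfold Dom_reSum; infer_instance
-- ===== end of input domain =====

-- B replaces A's string-based recursive digit summing by plain arithmetic while-loops (% and //), no string conversion (objective: alternative).

-- ===== PORT A =====

-- `sum += int(i)` for a one-char string i; int('-') raises ValueError in Python
-- (PySem.Int.ofChars? = none there) — such inputs (n < 0) are outside Pre_reSum.
def pvStep (s : Int) (i : Char) : Int := s + (PySem.Int.ofChars? [i]).getD 0

-- fuel-guarded transliteration of A's recursion (fuel is only a totality guard: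
-- each recursive call strictly decreases n, so n.toNat + 1 fuel never runs out on 0 ≤ n)
def pvReSumGo (fuel : Nat) (n : Int) (c : Int) : Int :=
  match fuel with
  | 0 => c
  | fuel + 1 =>
    if PySem.Str.len (PySem.Int.toStr n) = 1 then c
    else
      let n_s := PySem.Int.toStr n
      let sum := n_s.toList.foldl pvStep 0
      pvReSumGo fuel sum (c + 1)

-- literal port of A: recursion on n, digit sum via the characters of str(n)
def reSum (n : Int) (c : Int) : Int := pvReSumGo (n.toNat + 1) n c

-- ===== PORT B =====

-- inner `while m > 0: s += m % 10; m //= 10` of Source B (fuel = totality guard; m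
-- strictly decreases each iteration, so m.toNat + 1 fuel never runs out)
def pvDigitLoop (fuel : Nat) (s : Int) (m : Int) : Int :=
  match fuel with
  | 0 => s
  | fuel + 1 =>
    if 0 < m then pvDigitLoop fuel (s + PySem.Int.mod m 10) (PySem.Int.floordiv m 10) else s

-- outer `while n > 9` loop of Source B (fuel = totality guard, as above)
def pvAltGo (fuel : Nat) (n : Int) (c : Int) : Int :=
  match fuel with
  | 0 => c
  | fuel + 1 =>
    if 9 < n then pvAltGo fuel (pvDigitLoop (n.toNat + 1) 0 n) (c + 1) else c

-- literal port of B: arithmetic digit sum, iterated with the counter c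
def reSum_alt (n : Int) (c : Int) : Int := pvAltGo (n.toNat + 1) n c

-- ===== PRECONDITION & SPEC =====
-- Pre_ excludes n < 0: there Python A raises ValueError (int('-') fails on the sign
-- character), so A returns on exactly the inputs Pre_ admits.
def Pre_reSum (n : Int) (c : Int) : Prop := 0 ≤ n
instance (n : Int) (c : Int) : Decidable (Pre_reSum n c) := by unfold Pre_reSum; infer_instance

def pvWitness_reSum : Int × Int := (38, 0)

def Spec_reSum (n : Int) (c : Int) (out : Int) : Prop := out = reSum_alt n c
instance (n : Int) (c : Int) (out : Int) : Decidable (Spec_reSum n c out) := by unfold Spec_reSum; infer_instance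

-- ===== CLAIM (what is proved, stated in full; the proofs are below) =====
def Claim_equal_reSum : Prop := ∀ (n : Int) (c : Int), Dom_reSum n c → Pre_reSum n c → Spec_reSum n c (reSum n c)

-- ===== LEMMAS AND PROOFS =====

-- the base-10 digit sum, the common value both loops compute
def pvDigitSum (m : Nat) : Nat := (Nat.digits 10 m).sum

theorem pvDigitSum_zero : pvDigitSum 0 = 0 := by simp [pvDigitSum]

theorem pvDigitSum_eq (m : Nat) (h : m ≠ 0) :
    pvDigitSum m = m % 10 + pvDigitSum (m / 10) := by
  unfold pvDigitSum
  rw [Nat.digits_def' (by norm_num : 1 < 10) (Nat.pos_of_ne_zero h)]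
  simp

theorem pvDigitSum_le (m : Nat) : pvDigitSum m ≤ m := by
  induction m using Nat.strong_induction_on with
  | _ m ih =>
    by_cases h : m = 0
    · subst h; rw [pvDigitSum_zero]
    · rw [pvDigitSum_eq m h]
      have h1 : pvDigitSum (m / 10) ≤ m / 10 :=
        ih (m / 10) (Nat.div_lt_self (Nat.pos_of_ne_zero h) (by norm_num))
      omega

theorem pvDigitSum_lt (m : Nat) (h : 10 ≤ m) : pvDigitSum m < m := by
  rw [pvDigitSum_eq m (by omega)]
  have h1 : pvDigitSum (m / 10) ≤ m / 10 := pvDigitSum_le (m / 10)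
  omega

theorem pvParse_digitChar : ∀ d : Nat, d < 10 → (PySem.Int.ofChars? [Nat.digitChar d]).getD 0 = (d : Int) := by
  decide

theorem pvStep_digitChar (s : Int) (d : Nat) (h : d < 10) :
    pvStep s (Nat.digitChar d) = s + (d : Int) := by
  unfold pvStep
  rw [pvParse_digitChar d h]

theorem pvFold_core (f : Nat) : ∀ (n : Nat) (acc : List Char) (s : Int), n < f →
    (Nat.toDigitsCore 10 f n acc).foldl pvStep s = acc.foldl pvStep (s + (pvDigitSum n : Int)) := by
  induction f with
  | zero => intro n acc s h; omega
  | succ f ih =>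
    intro n acc s h
    simp only [Nat.toDigitsCore]
    by_cases h0 : n / 10 = 0
    · simp only [h0, if_true, List.foldl]
      rw [pvStep_digitChar s (n % 10) (Nat.mod_lt _ (by norm_num))]
      have hds : pvDigitSum n = n % 10 := by
        by_cases hn : n = 0
        · subst hn; rw [pvDigitSum_zero]
        · rw [pvDigitSum_eq n hn, h0, pvDigitSum_zero]
          omega
      rw [hds]
    · simp only [h0, if_false]
      have hlt : n / 10 < f := by
        have : n / 10 < n := Nat.div_lt_self (by omega) (by norm_num)
        omega
      rw [ih (n / 10) _ s hlt]
      simp only [List.foldl]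
      rw [pvStep_digitChar _ (n % 10) (Nat.mod_lt _ (by norm_num))]
      rw [pvDigitSum_eq n (by omega)]
      push_cast
      ring_nf

theorem pvFold_toDigits (m : Nat) :
    (Nat.toDigits 10 m).foldl pvStep 0 = (pvDigitSum m : Int) := by
  have := pvFold_core (m + 1) m [] 0 (by omega)
  simpa [Nat.toDigits] using this

theorem pvCore_len_ge (f : Nat) : ∀ (n : Nat) (acc : List Char), 0 < f →
    acc.length < (Nat.toDigitsCore 10 f n acc).length := by
  induction f with
  | zero => intro n acc h; omega
  | succ f ih =>
    intro n acc _
    simp only [Nat.toDigitsCore]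
    by_cases h0 : n / 10 = 0
    · simp [h0]
    · simp only [h0, if_false]
      cases f with
      | zero => simp [Nat.toDigitsCore]
      | succ g =>
        have := ih (n / 10) ((n % 10).digitChar :: acc) (Nat.succ_pos g)
        simp only [List.length_cons] at this
        omega

theorem pvToDigits_len_one (m : Nat) : (Nat.toDigits 10 m).length = 1 ↔ m < 10 := by
  simp only [Nat.toDigits, Nat.toDigitsCore]
  by_cases h0 : m / 10 = 0
  · simp only [h0, if_true, List.length_singleton]
    rw [Nat.div_eq_zero_iff] at h0
    rw [true_iff]
    omega
  · simp only [h0, if_false]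
    have hm : 0 < m := by omega
    have hlen := pvCore_len_ge m (m / 10) [(m % 10).digitChar] hm
    simp only [List.length_singleton] at hlen
    have h10 : ¬ m < 10 := fun hlt => h0 (Nat.div_eq_of_lt hlt)
    constructor
    · omega
    · omega

-- for 0 ≤ n: len(str(n)) and the digit-sum of str(n), in terms of pvDigitSum
theorem pvLen_toStr_nonneg (n : Int) (h : 0 ≤ n) :
    PySem.Str.len (PySem.Int.toStr n) = 1 ↔ n < 10 := by
  have hl := pvToDigits_len_one n.toNat
  simp only [PySem.Str.len, PySem.Int.toList_toStr, PySem.Int.toChars, if_neg (by omega : ¬ n < 0)]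
  constructor
  · intro h1
    have h2 : (Nat.toDigits 10 n.toNat).length = 1 := by exact_mod_cast h1
    have := hl.mp h2
    omega
  · intro h1
    have h2 := hl.mpr (by omega)
    rw [h2]
    norm_num

theorem pvSum_toStr_nonneg (n : Int) (h : 0 ≤ n) :
    (PySem.Int.toStr n).toList.foldl pvStep 0 = (pvDigitSum n.toNat : Int) := by
  simp only [PySem.Int.toList_toStr, PySem.Int.toChars, if_neg (by omega : ¬ n < 0)]
  exact pvFold_toDigits n.toNat

-- B's inner loop computes pvDigitSum once given enough fuel
theorem pvDigitLoop_eq (f : Nat) : ∀ (m : Int) (s : Int), m.toNat < f →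
    pvDigitLoop f s m = s + (pvDigitSum m.toNat : Nat) := by
  induction f with
  | zero => intro m s h; omega
  | succ f ih =>
    intro m s h
    simp only [pvDigitLoop]
    by_cases hm : 0 < m
    · rw [if_pos hm]
      have hmod : PySem.Int.mod m 10 = ((m.toNat % 10 : Nat) : Int) := by
        simp only [PySem.Int.mod]
        rw [Int.fmod_eq_emod]
        omega
      have hdiv : PySem.Int.floordiv m 10 = ((m.toNat / 10 : Nat) : Int) := by
        simp only [PySem.Int.floordiv]
        rw [Int.fdiv_eq_ediv]
        omega
      have hfl : ((m.toNat / 10 : Nat) : Int).toNat < f := by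
        have : m.toNat / 10 < m.toNat := Nat.div_lt_self (by omega) (by norm_num)
        omega
      rw [hmod, hdiv, ih _ _ hfl]
      rw [pvDigitSum_eq m.toNat (by omega)]
      simp only [Int.toNat_natCast]
      push_cast
      ring
    · rw [if_neg hm]
      have h0 : m.toNat = 0 := by omega
      rw [h0, pvDigitSum_zero]
      simp

-- both fuel loops agree for 0 ≤ n whenever each has more fuel than n.toNat
theorem pvMain (f : Nat) : ∀ (g : Nat) (n : Int) (c : Int), 0 ≤ n → n.toNat < f → n.toNat < g →
    pvReSumGo f n c = pvAltGo g n c := by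
  induction f with
  | zero => intro g n c h0 hf hg; omega
  | succ f ih =>
    intro g n c h0 hf hg
    match g, hg with
    | g + 1, _ =>
      simp only [pvReSumGo, pvAltGo]
      by_cases h10 : n < 10
      · rw [if_pos ((pvLen_toStr_nonneg n h0).mpr h10), if_neg (by omega)]
      · rw [if_neg (by rw [pvLen_toStr_nonneg n h0]; omega), if_pos (by omega)]
        rw [pvSum_toStr_nonneg n h0, pvDigitLoop_eq (n.toNat + 1) n 0 (by omega), zero_add]
        have hlt : pvDigitSum n.toNat < n.toNat := pvDigitSum_lt n.toNat (by omega)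
        have ht : ((pvDigitSum n.toNat : Nat) : Int).toNat = pvDigitSum n.toNat := by omega
        apply ih
        · omega
        · omega
        · omega

-- ===== VERDICT (by name: the statement is the Claim_ definition above) =====
theorem reSum_spec : Claim_equal_reSum := by
  intro n c _ hpre
  unfold Spec_reSum reSum reSum_alt
  exact pvMain (n.toNat + 1) (n.toNat + 1) n c hpre (by omega) (by omega)
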